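-- pv_equiv track=rewrite | github.com/xKimozZ/Gens-AI | agent.py | _summarize_elements
-- ===== SOURCE A (Python) =====
-- from typing import Dict, List, Any
--
-- def _summarize_elements(elements: List[Dict]) -> str:
--     """Summarize found elements for test generation"""
--     if not elements:
--         return "No interactive elements found"
--
--     summary = []
--     buttons = [e for e in elements if e.get('tag') == 'button']
--     links = [e for e in elements if e.get('tag') == 'a']
--     inputs = [e for e in elements if e.get('tag') == 'input']
--
--     if buttons:
--         summary.append(f"Buttons ({len(buttons)}): " + ", ".join([b.get('text', 'unnamed')[:30] for b in buttons[:5]]))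
--     if links:
--         summary.append(f"Links ({len(links)}): " + ", ".join([l.get('text', 'unnamed')[:30] for l in links[:5]]))
--     if inputs:
--         summary.append(f"Inputs ({len(inputs)}): " + ", ".join([i.get('type', 'text')[:20] for i in inputs[:5]]))
--
--     return "\n".join(summary)
-- ===== SOURCE B (Python) =====
-- def _summarize_elements(elements):
--     """Summarize found elements for test generation"""
--     if not elements:
--         return "No interactive elements found"
--
--     # streaming aggregation: per tag keep only a count and at most five
--     # already-truncated display strings; never store the elements themselves
--     spec = {'button': ('Buttons', 'text', 'unnamed', 30),
--             'a':      ('Links',   'text', 'unnamed', 30),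
--             'input':  ('Inputs',  'type', 'text',    20)}
--     stats = {t: (0, []) for t in spec}
--     for e in elements:
--         t = e.get('tag')
--         if t in stats:
--             cnt, samples = stats[t]
--             if cnt < 5:
--                 _, key, default, width = spec[t]
--                 samples = samples + [e.get(key, default)[:width]]
--             stats[t] = (cnt + 1, samples)
--
--     lines = []
--     for t, (label, _, _, _) in spec.items():
--         cnt, samples = stats[t]
--         if cnt:
--             lines.append(f"{label} ({cnt}): " + ", ".join(samples))
--     return "\n".join(lines)
-- ===== Notes on version B (the rewrite author's own statement) =====
-- stated objective: alternative
-- what changed: Replaces A's three filter passes that materialize bucket lists of elements with one streaming fold that maintains, per tag, only a running count and at most five already-truncated display strings; the summary is then rendered from these aggregates.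
import Mathlib
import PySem

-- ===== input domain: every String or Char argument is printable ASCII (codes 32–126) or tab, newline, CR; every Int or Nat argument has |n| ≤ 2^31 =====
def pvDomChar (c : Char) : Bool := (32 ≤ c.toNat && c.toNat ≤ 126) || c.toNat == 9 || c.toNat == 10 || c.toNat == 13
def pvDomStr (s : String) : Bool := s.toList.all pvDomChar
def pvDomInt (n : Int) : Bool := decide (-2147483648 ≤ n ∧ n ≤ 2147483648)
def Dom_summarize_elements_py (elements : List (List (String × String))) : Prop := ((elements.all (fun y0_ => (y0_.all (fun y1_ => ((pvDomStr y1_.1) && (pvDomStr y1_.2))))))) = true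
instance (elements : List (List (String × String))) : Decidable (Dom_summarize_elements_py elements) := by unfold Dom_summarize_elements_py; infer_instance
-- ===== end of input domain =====

-- B replaces A's three element-bucket filter passes with one streaming fold that keeps, per
-- tag, only a running count and at most five already-truncated display strings (alternative).

-- ===== PORT A =====
-- port of A: three list-comprehension filters, then three conditional appends to `summary`
def summarize_elements_py (elements : List (List (String × String))) : String :=
  if elements.isEmpty then "No interactive elements found"
  else
    let buttons := elements.filter (fun e => (PySem.Dict.mk e).get? "tag" == some "button")
    let links := elements.filter (fun e => (PySem.Dict.mk e).get? "tag" == some "a")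
    let inputs := elements.filter (fun e => (PySem.Dict.mk e).get? "tag" == some "input")
    let summary : List String := []
    let summary := if buttons.isEmpty then summary else
      summary ++ ["Buttons (" ++ PySem.Int.toStr (buttons.length : Int) ++ "): " ++
        PySem.Str.join ", " ((PySem.List.slice buttons none (some 5)).map
          (fun b => PySem.Str.slice ((PySem.Dict.mk b).getD "text" "unnamed") none (some 30)))]
    let summary := if links.isEmpty then summary else
      summary ++ ["Links (" ++ PySem.Int.toStr (links.length : Int) ++ "): " ++
        PySem.Str.join ", " ((PySem.List.slice links none (some 5)).map
          (fun l => PySem.Str.slice ((PySem.Dict.mk l).getD "text" "unnamed") none (some 30)))]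
    let summary := if inputs.isEmpty then summary else
      summary ++ ["Inputs (" ++ PySem.Int.toStr (inputs.length : Int) ++ "): " ++
        PySem.Str.join ", " ((PySem.List.slice inputs none (some 5)).map
          (fun i => PySem.Str.slice ((PySem.Dict.mk i).getD "type" "text") none (some 20)))]
    PySem.Str.join "\n" summary

-- ===== PORT B =====
-- Source B's per-tag running state: (count, at most five already-truncated sample strings)
-- Source B's loop body: bump the matching tag's count and, while count < 5, append the
-- truncated display string computed from spec[t]'s (key, default, width)
def pvStatsStep (st : (Nat × List String) × (Nat × List String) × (Nat × List String))
    (e : List (String × String)) :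
    (Nat × List String) × (Nat × List String) × (Nat × List String) :=
  let t := (PySem.Dict.mk e).get? "tag"
  let ((cb, sb), (cl, sl), (ci, si)) := st
  if t == some "button" then
    ((cb + 1, if cb < 5 then sb ++ [PySem.Str.slice ((PySem.Dict.mk e).getD "text" "unnamed") none (some 30)] else sb), (cl, sl), (ci, si))
  else if t == some "a" then
    ((cb, sb), (cl + 1, if cl < 5 then sl ++ [PySem.Str.slice ((PySem.Dict.mk e).getD "text" "unnamed") none (some 30)] else sl), (ci, si))
  else if t == some "input" then
    ((cb, sb), (cl, sl), (ci + 1, if ci < 5 then si ++ [PySem.Str.slice ((PySem.Dict.mk e).getD "type" "text") none (some 20)] else si))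
  else st

def summarize_elements_py_alt (elements : List (List (String × String))) : String :=
  if elements.isEmpty then "No interactive elements found"
  else
    let st := elements.foldl pvStatsStep ((0, []), (0, []), (0, []))
    let lines : List String :=
      (if st.1.1 ≠ 0 then ["Buttons (" ++ PySem.Int.toStr (st.1.1 : Int) ++ "): " ++ PySem.Str.join ", " st.1.2] else []) ++
      (if st.2.1.1 ≠ 0 then ["Links (" ++ PySem.Int.toStr (st.2.1.1 : Int) ++ "): " ++ PySem.Str.join ", " st.2.1.2] else []) ++
      (if st.2.2.1 ≠ 0 then ["Inputs (" ++ PySem.Int.toStr (st.2.2.1 : Int) ++ "): " ++ PySem.Str.join ", " st.2.2.2] else [])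
    PySem.Str.join "\n" lines

-- ===== PRECONDITION & SPEC =====
def Spec_summarize_elements_py (elements : List (List (String × String))) (out : String) : Prop := out = summarize_elements_py_alt elements
instance (elements : List (List (String × String))) (out : String) : Decidable (Spec_summarize_elements_py elements out) := by unfold Spec_summarize_elements_py; infer_instance

-- ===== CLAIM (what is proved, stated in full; the proofs are below) =====
def Claim_equal_summarize_elements_py : Prop := ∀ (elements : List (List (String × String))), Dom_summarize_elements_py elements → Spec_summarize_elements_py elements (summarize_elements_py elements)

-- ===== LEMMAS AND PROOFS =====

-- B's fold computes, per tag, the length of A's filter and the truncated strings of its first 5-c elements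
theorem pvStats_spec (l : List (List (String × String)))
    (cb cl ci : Nat) (sb sl si : List String) :
    l.foldl pvStatsStep ((cb, sb), (cl, sl), (ci, si)) =
      ((cb + (l.filter (fun e => (PySem.Dict.mk e).get? "tag" == some "button")).length,
        sb ++ ((l.filter (fun e => (PySem.Dict.mk e).get? "tag" == some "button")).take (5 - cb)).map
          (fun b => PySem.Str.slice ((PySem.Dict.mk b).getD "text" "unnamed") none (some 30))),
       (cl + (l.filter (fun e => (PySem.Dict.mk e).get? "tag" == some "a")).length,
        sl ++ ((l.filter (fun e => (PySem.Dict.mk e).get? "tag" == some "a")).take (5 - cl)).map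
          (fun b => PySem.Str.slice ((PySem.Dict.mk b).getD "text" "unnamed") none (some 30))),
       (ci + (l.filter (fun e => (PySem.Dict.mk e).get? "tag" == some "input")).length,
        si ++ ((l.filter (fun e => (PySem.Dict.mk e).get? "tag" == some "input")).take (5 - ci)).map
          (fun b => PySem.Str.slice ((PySem.Dict.mk b).getD "type" "text") none (some 20)))) := by
  induction l generalizing cb cl ci sb sl si with
  | nil => simp
  | cons e rest ih =>
    simp only [List.foldl_cons, List.filter_cons, pvStatsStep]
    by_cases hb : (PySem.Dict.mk e).get? "tag" == some "button"
    · have ha : ¬ ((PySem.Dict.mk e).get? "tag" == some "a") := by simp_all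
      have hi : ¬ ((PySem.Dict.mk e).get? "tag" == some "input") := by simp_all
      simp only [hb, ha, hi, if_true, ih]
      by_cases h5 : cb < 5
      · have : 5 - cb = (5 - (cb + 1)) + 1 := by omega
        simp [h5, this, List.take_succ_cons]
        omega
      · have : 5 - cb = 0 := by omega
        simp [h5, this]
        omega
    · by_cases ha : (PySem.Dict.mk e).get? "tag" == some "a"
      · have hi : ¬ ((PySem.Dict.mk e).get? "tag" == some "input") := by simp_all
        simp only [hb, ha, hi, if_true, ih]
        by_cases h5 : cl < 5
        · have : 5 - cl = (5 - (cl + 1)) + 1 := by omega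
          simp [h5, this, List.take_succ_cons]
          omega
        · have : 5 - cl = 0 := by omega
          simp [h5, this]
          omega
      · by_cases hi : (PySem.Dict.mk e).get? "tag" == some "input"
        · simp only [hb, ha, hi, if_true, ih]
          by_cases h5 : ci < 5
          · have : 5 - ci = (5 - (ci + 1)) + 1 := by omega
            simp [h5, this, List.take_succ_cons]
            omega
          · have : 5 - ci = 0 := by omega
            simp [h5, this]
            omega
        · simp [hb, ha, hi, ih]

-- xs[:5] is take 5 (Int numeral form of PySem.List.slice_to_natCast)
theorem pv_slice5 {α : Type} (xs : List α) :
    PySem.List.slice xs none (some 5) = xs.take 5 := by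
  exact_mod_cast PySem.List.slice_to_natCast xs 5

-- ===== VERDICT (by name: the statement is the Claim_ definition above) =====
theorem summarize_elements_py_spec : Claim_equal_summarize_elements_py := by
  intro elements _
  unfold Spec_summarize_elements_py summarize_elements_py summarize_elements_py_alt
  by_cases h : elements.isEmpty
  · simp [h]
  · simp only [h, if_false, Bool.false_eq_true, pvStats_spec, Nat.zero_add, List.nil_append,
      Nat.sub_zero, pv_slice5, List.map_take]
    simp only [ne_eq, ite_not, List.length_eq_zero_iff, List.isEmpty_iff]
    split_ifs <;> simp
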